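-- pv_equiv track=rewrite | github.com/whitejeric/foobar-solns | g1solution.py | solution
-- ===== SOURCE A (Python) =====
-- from math import sqrt as sq
--
-- def solution(i):
--     #prime string, get 5 digits
--     #soln
--     primes = [2, 3, 5, 7, 11, 13, 17, 19, 23, 29]
--     primestr = "2357111317192329"
--     num = 31
--     while len(primestr) < i+5:
--         if not testprime(num, primes):
--             num += 2
--         else:
--             primes.append(num)
--             primestr += str(num)
--             num += 2
--     return str(primestr[i:i+5])
--
-- def testprime(n, arr):
--     s = sq(n)
--     s_flr = 0
--     for i in range(0, len(arr)-1):
--         if arr[i] > s: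
--             s_flr = i - 1
--     for j in range(0, s_flr):
--         if (n % arr[j]) == 0:
--             return False
--     return True
-- ===== SOURCE B (Python) =====
-- def solution(i):
--     # Build the prime-digit string just long enough, then slice out 5 digits.
--     # No running prime list: each candidate is trial-divided by odd numbers up to its square root.
--     parts = []
--     total = 0
--     n = 2
--     while total < i + 5:
--         if _is_prime(n):
--             s = str(n)
--             parts.append(s)
--             total += len(s)
--         n += 1
--     return "".join(parts)[i:i + 5]
--
-- def _is_prime(n):
--     if n < 2:
--         return False
--     if n % 2 == 0:
--         return n == 2
--     d = 3
--     while d * d <= n: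
--         if n % d == 0:
--             return False
--         d += 2
--     return True
-- ===== Notes on version B (the rewrite author's own statement) =====
-- stated objective: faster
-- what changed: B drops A's growing prime list entirely: it trial-divides each candidate only by odd numbers up to its square root (A scans its whole prime list per candidate via a float-sqrt cutoff loop and divides by nearly all of it), collects the digit strings in a list with a running length counter, and joins once at the end instead of repeated string concatenation.
-- outside the precondition, e.g. on solution(-16): A returns '23571', B returns ''; on solution(-1): A returns '', B returns '7'
import Mathlib
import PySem

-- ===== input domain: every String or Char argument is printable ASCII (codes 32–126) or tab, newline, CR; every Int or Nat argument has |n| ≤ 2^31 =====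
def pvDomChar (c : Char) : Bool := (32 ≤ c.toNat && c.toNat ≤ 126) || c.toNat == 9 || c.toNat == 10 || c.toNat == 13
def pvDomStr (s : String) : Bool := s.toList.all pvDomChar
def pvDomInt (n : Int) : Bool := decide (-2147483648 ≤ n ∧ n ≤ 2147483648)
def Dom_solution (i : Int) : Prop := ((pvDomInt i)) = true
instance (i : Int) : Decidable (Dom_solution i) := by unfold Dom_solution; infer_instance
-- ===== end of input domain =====

-- B builds the prime-digit string with a plain list-of-strings accumulator and trial division of
-- each candidate by odd numbers up to its square root, instead of A's growing prime list, its
-- float-sqrt scan of that whole list per candidate, and repeated string concatenation (objective: faster).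


-- ===== PORT A =====
-- first loop of testprime: `s_flr`. Python compares `arr[i] > sqrt(n)` with a float sqrt; for the
-- integers occurring here (0 ≤ arr[i], 0 ≤ n < 2^52) that is exactly the integer test arr[i]*arr[i] > n.
-- Indices are always in range in every call (i < len(arr)), so pyGetD is exact here.
def sflrLoop (n : Int) (arr : List Int) : Int :=
  (PySem.List.pyRange 0 (PySem.List.len arr - 1) 1).foldl
    (fun s_flr i =>
      if PySem.List.pyGetD arr i 0 * PySem.List.pyGetD arr i 0 > n then i - 1 else s_flr) 0

-- second loop of testprime, with its early `return False`
def divLoop (n : Int) (arr : List Int) : List Int → Bool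
  | [] => true
  | j :: js =>
    if PySem.Int.mod n (PySem.List.pyGetD arr j 0) == 0 then false else divLoop n arr js

def testprime (n : Int) (arr : List Int) : Bool :=
  divLoop n arr (PySem.List.pyRange 0 (sflrLoop n arr) 1)

-- the while loop of A; `fuel` only bounds the iteration count (proved sufficient below), the loop
-- itself exits exactly when len(primestr) < i+5 fails, as in Python
def loopA (target : Int) : Nat → List Int → List Char → Int → List Char
  | 0, _, primestr, _ => primestr
  | fuel + 1, primes, primestr, num =>
    if PySem.List.len primestr < target then
      if testprime num primes = false then
        loopA target fuel primes primestr (num + 2)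
      else
        loopA target fuel (primes ++ [num]) (primestr ++ PySem.Int.toChars num) (num + 2)
    else primestr

-- 15·2^(i.toNat) iterations provably suffice to reach i+5 digits (Bertrand; lemmas below)
def fuelA (i : Int) : Nat := 15 * 2 ^ i.toNat

def solution (i : Int) : String :=
  PySem.Str.slice
    (String.ofList
      (loopA (i + 5) (fuelA i) [2, 3, 5, 7, 11, 13, 17, 19, 23, 29]
        "2357111317192329".toList 31))
    (some i) (some (i + 5))

-- ===== PORT B =====
-- the `while d * d <= n` loop of _is_prime (terminating: d grows, d ≤ d*d ≤ n)
def bIsPrimeLoop (n : Int) (d : Int) : Bool :=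
  if h : d * d ≤ n then
    if PySem.Int.mod n d == 0 then false
    else bIsPrimeLoop n (d + 2)
  else true
termination_by (n + 1 - d).toNat
decreasing_by
  have hd : d ≤ d * d := by nlinarith [mul_self_nonneg d, mul_self_nonneg (d - 1)]
  omega

def bIsPrime (n : Int) : Bool :=
  if n < 2 then false
  else if PySem.Int.mod n 2 == 0 then n == 2
  else bIsPrimeLoop n 3

-- 30·2^(i.toNat) iterations provably suffice (Bertrand; lemmas below)
def fuelB (i : Int) : Nat := 30 * 2 ^ i.toNat

-- the while loop of B: parts of the answer and the running total of digits
def loopB (target : Int) : Nat → List String → Int → Int → List String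
  | 0, parts, _, _ => parts
  | fuel + 1, parts, total, n =>
    if total < target then
      if bIsPrime n then
        loopB target fuel (parts ++ [PySem.Int.toStr n])
          (total + PySem.Str.len (PySem.Int.toStr n)) (n + 1)
      else loopB target fuel parts total (n + 1)
    else parts

def solution_alt (i : Int) : String :=
  PySem.Str.slice (PySem.Str.join "" (loopB (i + 5) (fuelB i) [] 0 2)) (some i) (some (i + 5))

-- ===== PRECONDITION & SPEC =====
-- Pre_ excludes only -20 ≤ i ≤ -1, i ≠ -5 (19 integers): there A slices its hardcoded 16-digit
-- preload "2357111317192329" with a negative index and returns an accidental fragment of it, while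
-- B's just-long-enough buffer yields a different accidental fragment — the puzzle's index is
-- meaningless there and neither value is specified by anything but slicing accidents.
def Pre_solution (i : Int) : Prop := 0 ≤ i ∨ i = -5 ∨ i ≤ -21
instance (i : Int) : Decidable (Pre_solution i) := by unfold Pre_solution; infer_instance
def pvWitness_solution : Int := 7
def Spec_solution (i : Int) (out : String) : Prop := out = solution_alt i
instance (i : Int) (out : String) : Decidable (Spec_solution i out) := by unfold Spec_solution; infer_instance

-- ===== CLAIM (what is proved, stated in full; the proofs are below) =====
def Claim_equal_solution : Prop := ∀ (i : Int), Dom_solution i → Pre_solution i → Spec_solution i (solution i)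

-- ===== LEMMAS AND PROOFS =====
set_option maxHeartbeats 1000000

-- the canonical objects: primes below m, their digit concatenation, and cast images
def pnats (m : Nat) : List Nat := (List.range m).filter (fun p => decide (Nat.Prime p))
def pchunk (p : Nat) : List Char := PySem.Int.toChars (p : Int)
def pstr1 (p : Nat) : String := PySem.Int.toStr (p : Int)
def pcs (m : Nat) : List Char := ((pnats m).map pchunk).flatten
def pints (m : Nat) : List Int := (pnats m).map (fun p : Nat => (p : Int))
def pstrs (m : Nat) : List String := (pnats m).map pstr1

lemma toDigitsCore_len_pos (b f n : Nat) (l : List Char) :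
    0 < (Nat.toDigitsCore b (f + 1) n l).length := by
  simp only [Nat.toDigitsCore]
  split
  · simp
  · rw [Nat.toDigitsCore_lens_eq]
    omega

lemma toChars_len_pos (p : Nat) : 0 < (PySem.Int.toChars (p : Int)).length := by
  simp only [PySem.Int.toChars]
  rw [if_neg (by omega : ¬ ((p : Int) < 0))]
  simp only [Int.toNat_natCast]
  simp only [Nat.toDigits]
  exact toDigitsCore_len_pos 10 p p []

lemma pnats_succ (m : Nat) :
    pnats (m + 1) = pnats m ++ (if Nat.Prime m then [m] else []) := by
  unfold pnats
  rw [List.range_succ, List.filter_append]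
  by_cases h : Nat.Prime m <;> simp [h]

lemma mem_pnats {p m : Nat} : p ∈ pnats m ↔ Nat.Prime p ∧ p < m := by
  simp [pnats, List.mem_filter, List.mem_range, and_comm]

lemma pnats_pairwise (m : Nat) : (pnats m).Pairwise (· < ·) :=
  List.Pairwise.sublist List.filter_sublist List.pairwise_lt_range

lemma pnats_prefix {m m' : Nat} (h : m ≤ m') : pnats m <+: pnats m' := by
  induction m', h using Nat.le_induction with
  | base => exact List.prefix_rfl
  | succ n hmn ih =>
    refine ih.trans ?_
    rw [pnats_succ]
    exact List.prefix_append _ _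

lemma pcs_eq_append {m m' : Nat} (h : m ≤ m') :
    ∃ t, pnats m' = pnats m ++ t ∧
      pcs m' = pcs m ++ (t.map pchunk).flatten := by
  obtain ⟨t, ht⟩ := pnats_prefix h
  refine ⟨t, ht.symm, ?_⟩
  unfold pcs
  rw [← ht, List.map_append, List.flatten_append]

lemma pcs_prefix {m m' : Nat} (h : m ≤ m') : pcs m <+: pcs m' := by
  obtain ⟨t, _, ht⟩ := pcs_eq_append h
  exact ⟨_, ht.symm⟩

lemma len_pcs_mono {m m' : Nat} (h : m ≤ m') : (pcs m).length ≤ (pcs m').length :=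
  (pcs_prefix h).length_le

lemma pcs_succ_prime {p : Nat} (hp : Nat.Prime p) :
    pcs (p + 1) = pcs p ++ pchunk p := by
  simp [pcs, pnats_succ, hp]

lemma len_pcs_lt {a b p : Nat} (hp : Nat.Prime p) (h1 : a ≤ p) (h2 : p < b) :
    (pcs a).length < (pcs b).length := by
  have hm1 : (pcs a).length ≤ (pcs p).length := len_pcs_mono h1
  have hm2 : (pcs (p + 1)).length ≤ (pcs b).length := len_pcs_mono (by omega)
  have hstep : (pcs (p + 1)).length = (pcs p).length + (pchunk p).length := by
    rw [pcs_succ_prime hp, List.length_append]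
  have hpos : 0 < (pchunk p).length := toChars_len_pos p
  omega

lemma pnats31 : pnats 31 = [2, 3, 5, 7, 11, 13, 17, 19, 23, 29] := by decide
lemma pcs31 : pcs 31 = "2357111317192329".toList := by decide
lemma pcs2 : pcs 2 = [] := by decide
lemma pcs30len : (pcs 30).length = 16 := by decide

lemma growth : ∀ k : Nat, 16 + k ≤ (pcs (30 * 2 ^ k)).length := by
  intro k
  induction k with
  | zero => simp [pcs30len]
  | succ k ih =>
    obtain ⟨p, hp, hlt, hle⟩ :=
      Nat.exists_prime_lt_and_le_two_mul (30 * 2 ^ k) (by positivity)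
    have hpb : p < 30 * 2 ^ (k + 1) := by
      rcases lt_or_eq_of_le hle with h | h
      · calc p < 2 * (30 * 2 ^ k) := h
          _ = 30 * 2 ^ (k + 1) := by ring
      · exfalso
        have hev : Even p := ⟨30 * 2 ^ k, by omega⟩
        have := (Nat.Prime.even_iff hp).mp hev
        omega
    have := len_pcs_lt hp (le_of_lt hlt) hpb
    have := ih
    omega

lemma bert_above {x b : Nat} (hx : Nat.Prime x) (h : ∀ p, Nat.Prime p → x < p → b ≤ p) :
    b ≤ 2 * x := by
  obtain ⟨p, hp, hxp, hle⟩ := Nat.exists_prime_lt_and_le_two_mul x hx.pos.ne'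
  exact (h p hp hxp).trans hle

lemma divLoop_eq_all (n : Int) (arr : List Int) (js : List Int) :
    divLoop n arr js = js.all (fun j => !(PySem.Int.mod n (PySem.List.pyGetD arr j 0) == 0)) := by
  induction js with
  | nil => rfl
  | cons j js ih =>
    rw [divLoop, List.all_cons, ih]
    by_cases h : PySem.Int.mod n (PySem.List.pyGetD arr j 0) == 0 <;> simp [h]

lemma testprime_eq (m : Nat) (hodd : Odd m) (hm : 31 ≤ m) :
    testprime (m : Int) (pints m) = decide (Nat.Prime m) := by
  have hlen10 : 10 ≤ (pnats m).length := by
    have h := (pnats_prefix hm).length_le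
    rw [pnats31] at h
    simpa using h
  have hget : ∀ i j (hi : i < (pnats m).length) (hj : j < (pnats m).length), i < j →
      (pnats m)[i] < (pnats m)[j] :=
    fun i j hi hj hij => List.pairwise_iff_getElem.mp (pnats_pairwise m) i j hi hj hij
  have h1 : (pnats m).length - 1 < (pnats m).length := by omega
  have h2 : (pnats m).length - 2 < (pnats m).length := by omega
  have h3 : (pnats m).length - 3 < (pnats m).length := by omega
  have hqP := mem_pnats.mp (List.getElem_mem h1)
  have hsP := mem_pnats.mp (List.getElem_mem h2)
  have hrP := mem_pnats.mp (List.getElem_mem h3)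
  have hidx : ∀ p, Nat.Prime p → p < m → ∃ j, ∃ hj : j < (pnats m).length, (pnats m)[j] = p := by
    intro p hp hpm
    exact List.mem_iff_getElem.mp (mem_pnats.mpr ⟨hp, hpm⟩)
  have hgeteq : ∀ i j (hi : i < (pnats m).length) (hj : j < (pnats m).length), i = j →
      (pnats m)[i] = (pnats m)[j] := by
    intro i j hi hj h
    subst h
    rfl
  -- any prime above the largest entry is ≥ m
  have htop : ∀ p, Nat.Prime p → (pnats m)[(pnats m).length - 1] < p → m ≤ p := by
    intro p hp hqp
    by_contra hlt
    push_neg at hlt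
    obtain ⟨j, hj, rfl⟩ := hidx p hp hlt
    rcases Nat.lt_or_ge j ((pnats m).length - 1) with h | h
    · exact absurd (hget j _ hj h1 h) (by omega)
    · have hje : j = (pnats m).length - 1 := by omega
      have heq := hgeteq j _ hj h1 hje
      omega
  have hm2q : m ≤ 2 * (pnats m)[(pnats m).length - 1] := bert_above hqP.1 htop
  -- any prime above the second entry is ≥ the largest entry
  have habove : ∀ p, Nat.Prime p → (pnats m)[(pnats m).length - 2] < p →
      (pnats m)[(pnats m).length - 1] ≤ p := by
    intro p hp hsp
    by_cases hpm : p < m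
    · obtain ⟨j, hj, rfl⟩ := hidx p hp hpm
      rcases Nat.lt_or_ge j ((pnats m).length - 1) with h | h
      · have hj2 : j ≤ (pnats m).length - 2 := by omega
        rcases lt_or_eq_of_le hj2 with h' | h'
        · exact absurd (hget j _ hj h2 h') (by omega)
        · have heq := hgeteq j _ hj h2 h'
          omega
      · have hje : j = (pnats m).length - 1 := by omega
        have heq := hgeteq j _ hj h1 hje
        omega
    · exact le_of_lt (lt_of_lt_of_le hqP.2 (le_of_not_gt hpm))
  have hq2s : (pnats m)[(pnats m).length - 1] ≤ 2 * (pnats m)[(pnats m).length - 2] :=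
    bert_above hsP.1 habove
  have hbelow : ∀ p, Nat.Prime p → (pnats m)[(pnats m).length - 3] < p →
      (pnats m)[(pnats m).length - 2] ≤ p := by
    intro p hp hrp
    by_cases hpm : p < m
    · obtain ⟨j, hj, rfl⟩ := hidx p hp hpm
      rcases Nat.lt_or_ge j ((pnats m).length - 2) with h | h
      · have hj3 : j ≤ (pnats m).length - 3 := by omega
        rcases lt_or_eq_of_le hj3 with h' | h'
        · exact absurd (hget j _ hj h3 h') (by omega)
        · have heq := hgeteq j _ hj h3 h'
          omega
      · rcases lt_or_eq_of_le h with h' | h'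
        · exact le_of_lt (hget _ j h2 hj h')
        · have heq := hgeteq _ j h2 hj h'
          omega
    · exact le_of_lt (lt_of_lt_of_le hsP.2 (le_of_not_gt hpm))
  have hs2r : (pnats m)[(pnats m).length - 2] ≤ 2 * (pnats m)[(pnats m).length - 3] :=
    bert_above hrP.1 hbelow
  -- the third-from-top entry is at least 19
  have h31len : (pnats 31).length = 10 := by rw [pnats31]; rfl
  have hr19 : 19 ≤ (pnats m)[(pnats m).length - 3] := by
    obtain ⟨t, ht⟩ := pnats_prefix hm
    have h7 : (pnats m)[7]'(by omega) = 19 := by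
      rw [List.getElem_of_eq ht.symm (by omega)]
      rw [List.getElem_append_left (by omega)]
      rw [List.getElem_of_eq pnats31 (by omega)]
      rfl
    rcases lt_or_eq_of_le (show 7 ≤ (pnats m).length - 3 by omega) with h | h
    · have := hget 7 _ (by omega) h3 h
      omega
    · have heq := hgeteq 7 _ (by omega) h3 h
      omega
  have hs19 : 20 ≤ (pnats m)[(pnats m).length - 2] := by
    have := hget _ _ h3 h2 (by omega)
    omega
  -- arithmetic: m < s² and m < r²
  have hms2 : m < (pnats m)[(pnats m).length - 2] * (pnats m)[(pnats m).length - 2] := by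
    nlinarith
  have hmr2 : m < (pnats m)[(pnats m).length - 3] * (pnats m)[(pnats m).length - 3] := by
    nlinarith
  -- the indexing helper
  have hpintlen : (pints m).length = (pnats m).length := by simp [pints]
  have hgetelem : ∀ j : Nat, ∀ hj : j < (pnats m).length,
      PySem.List.pyGetD (pints m) ((j : Nat) : Int) 0 = ((pnats m)[j] : Int) := by
    intro j hj
    rw [PySem.List.pyGetD_natCast, List.getD_eq_getElem _ _ (by simpa [pints] using hj)]
    simp [pints]
  -- the first loop lands on s_flr = L - 3
  have hsflr : sflrLoop (m : Int) (pints m) = ((pnats m).length : Int) - 3 := by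
    unfold sflrLoop
    rw [PySem.List.len_eq, hpintlen]
    rw [show ((pnats m).length : Int) - 1 = (((pnats m).length - 2 : Nat) : Int) + 1 from by
      push_cast [Nat.cast_sub (by omega : 2 ≤ (pnats m).length)]; ring]
    rw [PySem.List.pyRange_one_succ_right (by positivity)]
    rw [List.foldl_append]
    simp only [List.foldl_cons, List.foldl_nil]
    rw [hgetelem _ h2]
    rw [if_pos (by exact_mod_cast hms2)]
    push_cast [Nat.cast_sub (by omega : 2 ≤ (pnats m).length)]
    ring
  unfold testprime
  rw [hsflr, divLoop_eq_all]
  by_cases hp : Nat.Prime m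
  · simp only [hp, decide_true]
    rw [List.all_eq_true]
    intro j hj
    rw [PySem.List.mem_pyRange_one] at hj
    obtain ⟨hj0, hj1⟩ := hj
    obtain ⟨jn, rfl⟩ := Int.eq_ofNat_of_zero_le hj0
    have hjn : jn < (pnats m).length := by
      have : (jn : Int) < ((pnats m).length : Int) - 3 := hj1
      omega
    rw [hgetelem jn hjn]
    have hPj := mem_pnats.mp (List.getElem_mem hjn)
    rw [PySem.Int.mod_natCast]
    simp only [Bool.not_eq_eq_eq_not, Bool.not_true, beq_eq_false_iff_ne, ne_eq,
      Int.natCast_eq_zero]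
    intro hmod
    have hdvd : (pnats m)[jn] ∣ m := Nat.dvd_of_mod_eq_zero hmod
    rcases (hp.eq_one_or_self_of_dvd _ hdvd) with h | h
    · exact (Nat.Prime.one_lt hPj.1).ne' h
    · exact hPj.2.ne h
  · simp only [hp, decide_false]
    have hm1 : m ≠ 1 := by omega
    have hf := Nat.minFac_prime hm1
    have hfd := Nat.minFac_dvd m
    have hfsq : m.minFac * m.minFac ≤ m := by
      have := Nat.minFac_sq_le_self (by omega : 0 < m) hp
      nlinarith [this]
    have hfm : m.minFac < m := by
      rcases lt_or_eq_of_le (Nat.le_of_dvd (by omega) hfd) with h | h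
      · exact h
      · exact absurd (h ▸ hf) hp
    obtain ⟨j, hj, hjf⟩ := hidx m.minFac hf hfm
    have hfr : m.minFac < (pnats m)[(pnats m).length - 3] := by nlinarith
    have hjL : j < (pnats m).length - 3 := by
      by_contra hle
      push_neg at hle
      have hge : (pnats m)[(pnats m).length - 3] ≤ (pnats m)[j] := by
        rcases lt_or_eq_of_le hle with h | h
        · exact le_of_lt (hget _ j h3 hj h)
        · exact le_of_eq (hgeteq _ j h3 hj h)
      omega
    rw [List.all_eq_false]
    refine ⟨(j : Int), ?_, ?_⟩
    · rw [PySem.List.mem_pyRange_one]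
      constructor
      · positivity
      · omega
    · rw [hgetelem j hj, hjf, PySem.Int.mod_natCast]
      simp [Nat.mod_eq_zero_of_dvd hfd]

lemma bLoop_eq (m : Nat) (hmo : Odd m) (h3 : 3 ≤ m) :
    ∀ (k d : Nat), m + 2 - d ≤ k → Odd d → 3 ≤ d → (∀ e, 2 ≤ e → e < d → ¬ e ∣ m) →
      bIsPrimeLoop (m : Int) (d : Int) = decide (Nat.Prime m) := by
  intro k
  induction k with
  | zero =>
    intro d hk hdo hd3 hnd
    have hdm : m < d := by omega
    have hn : m < d * d := lt_of_lt_of_le hdm (by nlinarith)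
    rw [bIsPrimeLoop, dif_neg (not_le.mpr (by exact_mod_cast hn))]
    symm
    simp only [decide_eq_true_eq]
    rw [Nat.prime_def_lt']
    exact ⟨by omega, fun e he hem => hnd e he (by omega)⟩
  | succ k ih =>
    intro d hk hdo hd3 hnd
    rw [bIsPrimeLoop]
    by_cases hc : (d : Int) * (d : Int) ≤ (m : Int)
    · rw [dif_pos hc]
      have hddm : d * d ≤ m := by exact_mod_cast hc
      have hdm : d < m := by nlinarith
      by_cases hdvd : d ∣ m
      · rw [if_pos (by
          rw [PySem.Int.mod_natCast]
          simp [Nat.mod_eq_zero_of_dvd hdvd])]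
        symm
        simp only [decide_eq_false_iff_not]
        intro hpm
        rcases hpm.eq_one_or_self_of_dvd d hdvd with h | h <;> omega
      · rw [if_neg (by
          rw [PySem.Int.mod_natCast]
          simp only [beq_iff_eq, Int.natCast_eq_zero]
          exact fun h => hdvd (Nat.dvd_of_mod_eq_zero h))]
        rw [show (d : Int) + 2 = ((d + 2 : Nat) : Int) from by push_cast; ring]
        apply ih (d + 2) (by omega) (hdo.add_even even_two) (by omega)
        intro e he hed hdvde
        rcases Nat.lt_or_ge e d with h | h
        · exact hnd e he h hdvde
        · have : e = d ∨ e = d + 1 := by omega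
          rcases this with rfl | rfl
          · exact hdvd hdvde
          · have hev : Even (d + 1) := Odd.add_one hdo
            have h2m : 2 ∣ m := dvd_trans hev.two_dvd hdvde
            rw [Nat.odd_iff] at hmo
            omega
    · rw [dif_neg hc]
      have hmd : m < d * d := by
        have := not_le.mp hc
        exact_mod_cast this
      symm
      simp only [decide_eq_true_eq]
      rw [Nat.prime_def_lt']
      refine ⟨by omega, fun e he hem hedvd => ?_⟩
      rcases Nat.lt_or_ge e d with h | h
      · exact hnd e he h hedvd
      · obtain ⟨c, hc'⟩ := hedvd
        have hepos : 0 < e := by omega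
        have hc0 : c ≠ 0 := by rintro rfl; omega
        have hc1 : c ≠ 1 := by rintro rfl; omega
        have hcd : c < d := by nlinarith
        exact hnd c (by omega) hcd ⟨e, by rw [hc']; ring⟩

lemma bIsPrime_eq (m : Nat) : bIsPrime (m : Int) = decide (Nat.Prime m) := by
  unfold bIsPrime
  by_cases h2 : m < 2
  · rw [if_pos (by exact_mod_cast h2)]
    interval_cases m <;> decide
  · rw [if_neg (by exact_mod_cast h2)]
    push_neg at h2
    have hmod2 : PySem.Int.mod (m : Int) 2 = ((m % 2 : Nat) : Int) := by
      exact_mod_cast PySem.Int.mod_natCast m 2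
    by_cases hev : m % 2 = 0
    · rw [if_pos (by rw [hmod2, hev]; rfl)]
      by_cases hm2 : m = 2
      · subst hm2; decide
      · have hnp : ¬ Nat.Prime m := by
          intro hp
          rcases hp.eq_one_or_self_of_dvd 2 (Nat.dvd_of_mod_eq_zero hev) with h | h <;> omega
        simp only [hnp, decide_false, beq_eq_false_iff_ne, ne_eq]
        exact_mod_cast hm2
    · rw [if_neg (by
        rw [hmod2]
        simp only [beq_iff_eq, Int.natCast_eq_zero]
        omega)]
      have hodd : Odd m := Nat.odd_iff.mpr (by omega)
      have h3 : 3 ≤ m := by omega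
      rw [show (3 : Int) = ((3 : Nat) : Int) from by norm_num]
      apply bLoop_eq m hodd h3 (m + 2 - 3) 3 le_rfl (by decide) le_rfl
      intro e he hlt hdvd
      have : e = 2 := by omega
      subst this
      rw [Nat.odd_iff] at hodd
      omega

lemma not_prime_succ_of_odd {m : Nat} (hodd : Odd m) (hm : 31 ≤ m) : ¬ Nat.Prime (m + 1) := by
  intro h
  have hev : Even (m + 1) := Odd.add_one hodd
  rw [Nat.Prime.even_iff h] at hev
  omega

lemma loopA_run (target : Int) :
    ∀ (fuel : Nat) (m : Nat), Odd m → 31 ≤ m →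
      target ≤ ((pcs (m + 2 * fuel)).length : Int) →
      ∃ m' : Nat, loopA target fuel (pints m) (pcs m) (m : Int) = pcs m' ∧
        target ≤ ((pcs m').length : Int) := by
  intro fuel
  induction fuel with
  | zero =>
    intro m _ _ hlen
    exact ⟨m, rfl, by simpa using hlen⟩
  | succ fuel ih =>
    intro m hodd hm hlen
    rw [loopA]
    by_cases hlt : PySem.List.len (pcs m) < target
    · rw [if_pos hlt, testprime_eq m hodd hm]
      have e3 : (m : Int) + 2 = ((m + 2 : Nat) : Int) := by push_cast; ring
      have hlen' : target ≤ ((pcs (m + 2 + 2 * fuel)).length : Int) := by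
        rw [show m + 2 + 2 * fuel = m + 2 * (fuel + 1) from by ring]
        exact hlen
      by_cases hp : Nat.Prime m
      · rw [if_neg (by simp [hp])]
        have hpn2 : pnats (m + 2) = pnats m ++ [m] := by
          rw [show m + 2 = (m + 1) + 1 from rfl, pnats_succ, pnats_succ]
          simp [hp, not_prime_succ_of_odd hodd hm]
        rw [show pints m ++ [(m : Int)] = pints (m + 2) from by simp [pints, hpn2],
          show pcs m ++ PySem.Int.toChars (m : Int) = pcs (m + 2) from by
            simp [pcs, hpn2, pchunk],
          e3]
        exact ih (m + 2) (hodd.add_even even_two) (by omega) hlen'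
      · rw [if_pos (by simp [hp])]
        have hpn2 : pnats (m + 2) = pnats m := by
          rw [show m + 2 = (m + 1) + 1 from rfl, pnats_succ, pnats_succ]
          simp [hp, not_prime_succ_of_odd hodd hm]
        rw [show pints m = pints (m + 2) from by simp [pints, hpn2],
          show pcs m = pcs (m + 2) from by simp [pcs, hpn2], e3]
        exact ih (m + 2) (hodd.add_even even_two) (by omega) hlen'
    · rw [if_neg hlt]
      refine ⟨m, rfl, ?_⟩
      rw [PySem.List.len_eq] at hlt
      omega

lemma loopB_run (target : Int) :
    ∀ (fuel : Nat) (m : Nat),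
      target ≤ ((pcs (m + fuel)).length : Int) →
      ∃ m' : Nat, loopB target fuel (pstrs m) ((pcs m).length : Int) (m : Int) = pstrs m' ∧
        target ≤ ((pcs m').length : Int) := by
  intro fuel
  induction fuel with
  | zero =>
    intro m hlen
    exact ⟨m, rfl, by simpa using hlen⟩
  | succ fuel ih =>
    intro m hlen
    rw [loopB]
    by_cases hlt : ((pcs m).length : Int) < target
    · rw [if_pos hlt, bIsPrime_eq]
      have e3 : (m : Int) + 1 = ((m + 1 : Nat) : Int) := by push_cast; ring
      have hlen' : target ≤ ((pcs (m + 1 + fuel)).length : Int) := by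
        rw [show m + 1 + fuel = m + (fuel + 1) from by ring]
        exact hlen
      by_cases hp : Nat.Prime m
      · rw [if_pos (by simp [hp])]
        have hpn1 : pnats (m + 1) = pnats m ++ [m] := by
          rw [pnats_succ]; simp [hp]
        have e2 : ((pcs m).length : Int) + PySem.Str.len (PySem.Int.toStr (m : Int)) =
            ((pcs (m + 1)).length : Int) := by
          rw [PySem.Str.len_eq, PySem.Int.toList_toStr,
            show pcs (m + 1) = pcs m ++ PySem.Int.toChars (m : Int) from by
              simp [pcs, hpn1, pchunk]]
          push_cast [List.length_append]
          ring
        rw [show pstrs m ++ [PySem.Int.toStr (m : Int)] = pstrs (m + 1) from by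
            simp [pstrs, hpn1, pstr1],
          e2, e3]
        exact ih (m + 1) hlen'
      · rw [if_neg (by simp [hp])]
        have hpn1 : pnats (m + 1) = pnats m := by
          rw [pnats_succ]; simp [hp]
        rw [show pstrs m = pstrs (m + 1) from by simp [pstrs, hpn1],
          show ((pcs m).length : Int) = ((pcs (m + 1)).length : Int) from by
            simp [pcs, hpn1],
          e3]
        exact ih (m + 1) hlen'
    · rw [if_neg hlt]
      exact ⟨m, rfl, by omega⟩

lemma joinNil (ls : List (List Char)) : PySem.Chars.join [] ls = ls.flatten := by
  induction ls with
  | nil => simp [PySem.Chars.join_nil]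
  | cons a ls ih =>
    cases ls with
    | nil => simp [PySem.Chars.join_singleton]
    | cons b rest =>
      rw [PySem.Chars.join_cons_cons]
      rw [ih]
      simp

lemma join_pstrs (m : Nat) : (PySem.Str.join "" (pstrs m)).toList = pcs m := by
  rw [PySem.Str.toList_join]
  have h1 : (pstrs m).map String.toList = (pnats m).map pchunk := by
    simp [pstrs, List.map_map, Function.comp_def, PySem.Int.toList_toStr, pstr1, pchunk]
  rw [h1, show ("" : String).toList = ([] : List Char) from rfl, joinNil]
  rfl

lemma loopA_exit {target : Int} {fuel : Nat} {ps : List Int} {str : List Char} {num : Int}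
    (h : ¬ PySem.List.len str < target) : loopA target fuel ps str num = str := by
  cases fuel with
  | zero => rfl
  | succ n => rw [loopA, if_neg h]

lemma loopB_exit {target : Int} {fuel : Nat} {parts : List String} {total num : Int}
    (h : ¬ total < target) : loopB target fuel parts total num = parts := by
  cases fuel with
  | zero => rfl
  | succ n => rw [loopB, if_neg h]

lemma take_of_prefix {l u : List Char} (h : l <+: u) {k : Nat} (hk : k ≤ l.length) :
    u.take k = l.take k := by
  obtain ⟨t, rfl⟩ := h
  rw [List.take_append_of_le_length hk]

lemma slice_agree {l u : List Char} (h : l <+: u) (i : Int) (hi : 0 ≤ i)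
    (hl : i + 5 ≤ (l.length : Int)) :
    PySem.List.slice l (some i) (some (i + 5)) = PySem.List.slice u (some i) (some (i + 5)) := by
  rw [PySem.List.slice_toNat l hi (by omega), PySem.List.slice_toNat u hi (by omega)]
  rw [← List.drop_take, ← List.drop_take]
  rw [take_of_prefix h (by omega : (i + 5).toNat ≤ l.length)]

lemma slice_neg_empty (l : List Char) {i : Int} (hi : i + 5 = 0 ∨ i ≤ -21) (hlen : l.length ≤ 16) :
    PySem.List.slice l (some i) (some (i + 5)) = ([] : List Char) := by
  have h0 : PySem.List.clampIdx l.length (i + 5) = 0 := by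
    rcases hi with h | h
    · rw [h, show (0 : Int) = ((0 : Nat) : Int) from rfl, PySem.List.clampIdx_natCast]
      omega
    · rw [show i + 5 = -(((-(i + 5)).toNat : Nat) : Int) from by omega,
        PySem.List.clampIdx_neg_natCast _ _ (by omega)]
      omega
  have hz : (PySem.List.slice l (some i) (some (i + 5))).length = 0 := by
    rw [PySem.List.length_slice, h0]
    omega
  exact List.length_eq_zero_iff.mp hz

-- ===== VERDICT (by name: the statement is the Claim_ definition above) =====
theorem solution_spec : Claim_equal_solution := by
  unfold Claim_equal_solution
  intro i _ hpre
  unfold Spec_solution solution solution_alt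
  refine String.toList_inj.mp ?_
  rw [PySem.Str.toList_slice, PySem.Str.toList_slice]
  simp only [PySem.Chars.slice_eq_listSlice]
  rcases hpre with hpos | hrest
  · -- 0 ≤ i : both loops run until the prime-digit string covers i+5 characters
    have hcast : ((i.toNat : Nat) : Int) = i := Int.toNat_of_nonneg hpos
    have hbA : i + 5 ≤ ((pcs (31 + 2 * fuelA i)).length : Int) := by
      have hg := growth i.toNat
      have hmono : (pcs (30 * 2 ^ i.toNat)).length ≤ (pcs (31 + 2 * fuelA i)).length := by
        apply len_pcs_mono
        unfold fuelA
        omega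
      have : (16 + i.toNat : Nat) ≤ (pcs (31 + 2 * fuelA i)).length := le_trans hg hmono
      have h5 : i + 5 ≤ ((16 + i.toNat : Nat) : Int) := by push_cast; omega
      calc i + 5 ≤ ((16 + i.toNat : Nat) : Int) := h5
        _ ≤ _ := by exact_mod_cast this
    have hbB : i + 5 ≤ ((pcs (2 + fuelB i)).length : Int) := by
      have hg := growth i.toNat
      have hmono : (pcs (30 * 2 ^ i.toNat)).length ≤ (pcs (2 + fuelB i)).length := by
        apply len_pcs_mono
        unfold fuelB
        omega
      have : (16 + i.toNat : Nat) ≤ (pcs (2 + fuelB i)).length := le_trans hg hmono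
      have h5 : i + 5 ≤ ((16 + i.toNat : Nat) : Int) := by push_cast; omega
      calc i + 5 ≤ ((16 + i.toNat : Nat) : Int) := h5
        _ ≤ _ := by exact_mod_cast this
    obtain ⟨mA, hA, hlenA⟩ := loopA_run (i + 5) (fuelA i) 31 (by decide) le_rfl hbA
    obtain ⟨mB, hB, hlenB⟩ := loopB_run (i + 5) (fuelB i) 2 hbB
    have eA : loopA (i + 5) (fuelA i) [2, 3, 5, 7, 11, 13, 17, 19, 23, 29]
        "2357111317192329".toList 31 = pcs mA := by
      rw [show ([2, 3, 5, 7, 11, 13, 17, 19, 23, 29] : List Int) = pints 31 from by decide,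
        show "2357111317192329".toList = pcs 31 from pcs31.symm,
        show (31 : Int) = ((31 : Nat) : Int) from by norm_num]
      exact hA
    have eB : loopB (i + 5) (fuelB i) [] 0 2 = pstrs mB := by
      rw [show ([] : List String) = pstrs 2 from by
          simp [pstrs, show pnats 2 = [] from by decide],
        show (0 : Int) = ((pcs 2).length : Int) from by simp [pcs2],
        show (2 : Int) = ((2 : Nat) : Int) from by norm_num]
      exact hB
    rw [eA, eB, String.toList_ofList, join_pstrs]
    rcases le_total mA mB with h | h
    · exact slice_agree (pcs_prefix h) i hpos hlenA
    · exact (slice_agree (pcs_prefix h) i hpos hlenB).symm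
  · -- i = -5 or i ≤ -21 : both loops exit at once and both slices are empty
    have hile : i + 5 ≤ 0 := by rcases hrest with rfl | h <;> omega
    have hA : loopA (i + 5) (fuelA i) [2, 3, 5, 7, 11, 13, 17, 19, 23, 29]
        "2357111317192329".toList 31 = "2357111317192329".toList :=
      loopA_exit (by
        rw [PySem.List.len_eq, show ("2357111317192329".toList).length = 16 from by decide]
        omega)
    have hB : loopB (i + 5) (fuelB i) [] 0 2 = [] := loopB_exit (by omega)
    rw [hA, hB, String.toList_ofList]
    rw [show (PySem.Str.join "" ([] : List String)).toList = ([] : List Char) from by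
      rw [PySem.Str.toList_join]; simp [PySem.Chars.join_nil]]
    rw [slice_neg_empty _ (hrest.imp (fun h => by omega) (fun h => h)) (by decide)]
    rw [slice_neg_empty ([] : List Char) (hrest.imp (fun h => by omega) (fun h => h)) (by simp)]
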